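-- pv_equiv track=rewrite | github.com/AKHILA-AKHI02/python6 | printalphad307.py | printalpha
-- ===== SOURCE A (Python) =====
-- def printalpha(n):
--     temp=''
--     for row in range(1,n+1,1):
--         x=66
--         for col in range(1,row+1):
--             temp=temp+str(x)
--             x=x+1
--         temp=temp+'\n'
--     return temp
-- ===== SOURCE B (Python) =====
-- def printalpha(n):
--     out = []
--     line = ''
--     x = 66
--     for row in range(1, n + 1):
--         line = line + str(x)
--         x = x + 1
--         out.append(line + '\n')
--     return ''.join(out)
-- ===== Notes on version B (the rewrite author's own statement) =====
-- stated objective: simpler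
-- what changed: Replaces the nested double loop (counter reset to 66 each row) by a single pass that threads one running line and one never-reset counter, each row being the cumulative prefix of the previous one, joined at the end.
import Mathlib
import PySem

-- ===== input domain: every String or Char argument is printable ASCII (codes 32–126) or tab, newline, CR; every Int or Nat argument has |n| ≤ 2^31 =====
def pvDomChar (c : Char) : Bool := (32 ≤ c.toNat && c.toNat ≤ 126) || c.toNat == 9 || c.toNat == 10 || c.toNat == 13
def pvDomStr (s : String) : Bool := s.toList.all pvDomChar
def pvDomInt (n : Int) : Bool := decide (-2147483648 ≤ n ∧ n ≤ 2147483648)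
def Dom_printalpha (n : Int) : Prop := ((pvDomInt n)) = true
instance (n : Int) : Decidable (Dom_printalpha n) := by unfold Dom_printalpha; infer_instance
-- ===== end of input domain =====

-- B replaces A's nested double loop (counter reset to 66 each row) by a single pass
-- threading one running line and one never-reset counter; objective: simpler.

-- ===== PORT A =====
def printalpha (n : Int) : String :=
  (PySem.List.pyRange 1 (n + 1) 1).foldl (fun temp row =>
    ((PySem.List.pyRange 1 (row + 1) 1).foldl
      (fun (p : String × Int) _ => (p.1 ++ PySem.Int.toStr p.2, p.2 + 1)) (temp, 66)).1 ++ "\n") ""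

-- ===== PORT B =====
def printalpha_alt (n : Int) : String :=
  String.join ((PySem.List.pyRange 1 (n + 1) 1).foldl
    (fun (st : List String × String × Int) _ =>
      let line := st.2.1 ++ PySem.Int.toStr st.2.2
      (st.1 ++ [line ++ "\n"], line, st.2.2 + 1)) ([], "", 66)).1

-- ===== PRECONDITION & SPEC =====
def Spec_printalpha (n : Int) (out : String) : Prop := out = printalpha_alt n
instance (n : Int) (out : String) : Decidable (Spec_printalpha n out) := by unfold Spec_printalpha; infer_instance

-- ===== CLAIM (what is proved, stated in full; the proofs are below) =====
def Claim_equal_printalpha : Prop := ∀ (n : Int), Dom_printalpha n → Spec_printalpha n (printalpha n)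

-- ===== LEMMAS AND PROOFS =====

-- the string "str(x) ++ str(x+1) ++ … " of k consecutive numbers starting at x
def lineFrom (x : Int) : Nat → String
  | 0 => ""
  | k + 1 => PySem.Int.toStr x ++ lineFrom (x + 1) k

lemma lineFrom_snoc (k : Nat) : ∀ (x : Int),
    lineFrom x (k + 1) = lineFrom x k ++ PySem.Int.toStr (x + k) := by
  induction k with
  | zero => intro x; simp [lineFrom]
  | succ k ih =>
      intro x
      have h : x + 1 + (k : Int) = x + ((k + 1 : Nat) : Int) := by push_cast; ring
      calc lineFrom x (k + 2) = PySem.Int.toStr x ++ lineFrom (x + 1) (k + 1) := rfl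
        _ = PySem.Int.toStr x ++ (lineFrom (x + 1) k ++ PySem.Int.toStr (x + 1 + k)) := by rw [ih]
        _ = (PySem.Int.toStr x ++ lineFrom (x + 1) k) ++ PySem.Int.toStr (x + 1 + k) := by
              rw [String.append_assoc]
        _ = lineFrom x (k + 1) ++ PySem.Int.toStr (x + ((k + 1 : Nat) : Int)) := by rw [h]; simp only [lineFrom]

-- reference accumulator: m remaining rows, k rows already emitted, o output so far
def outAux : Nat → Nat → String → String
  | 0, _, o => o
  | m + 1, k, o => outAux m (k + 1) (o ++ lineFrom 66 (k + 1) ++ "\n")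

-- A's inner loop appends the k consecutive numbers from x
lemma innerA (l : List Int) : ∀ (temp : String) (x : Int),
    l.foldl (fun (p : String × Int) _ => (p.1 ++ PySem.Int.toStr p.2, p.2 + 1)) (temp, x)
      = (temp ++ lineFrom x l.length, x + l.length) := by
  induction l with
  | nil => intro temp x; simp [lineFrom]
  | cons a l ih =>
      intro temp x
      simp only [List.foldl_cons, List.length_cons, ih]
      simp only [Prod.mk.injEq]
      refine ⟨?_, ?_⟩
      · simp only [lineFrom, String.append_assoc]
      · push_cast; ring

-- A's outer loop over rows a, a+1, …, a+m-1
lemma outerA (m : Nat) : ∀ (a : Int) (o : String), 1 ≤ a →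
    (PySem.List.pyRange a (a + m) 1).foldl (fun temp row =>
      ((PySem.List.pyRange 1 (row + 1) 1).foldl
        (fun (p : String × Int) _ => (p.1 ++ PySem.Int.toStr p.2, p.2 + 1)) (temp, 66)).1 ++ "\n") o
      = outAux m (a - 1).toNat o := by
  induction m with
  | zero =>
      intro a o ha
      rw [PySem.List.pyRange_one_eq_nil (by simp)]
      simp [outAux]
  | succ m ih =>
      intro a o ha
      rw [PySem.List.pyRange_one_cons (by omega)]
      simp only [List.foldl_cons]
      rw [innerA]
      have hlen : (PySem.List.pyRange 1 (a + 1) 1).length = a.toNat := by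
        rw [PySem.List.length_pyRange_one]; omega
      rw [hlen]
      have : a + (m + 1 : Nat) = (a + 1) + m := by push_cast; ring
      rw [this, ih (a + 1) _ (by omega)]
      show outAux m (a + 1 - 1).toNat _ = outAux (m + 1) (a - 1).toNat o
      have h1 : (a + 1 - 1).toNat = (a - 1).toNat + 1 := by omega
      have h2 : a.toNat = (a - 1).toNat + 1 := by omega
      rw [h1, h2]
      rfl

lemma join_append (l : List String) (s : String) :
    String.join (l ++ [s]) = String.join l ++ s := by
  induction l with
  | nil => simp [String.join]
  | cons a l ih => simp [String.join]

-- B's single pass, with the invariant state after k rows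
lemma passB (l : List Int) : ∀ (acc : List String) (k : Nat),
    String.join ((l.foldl (fun (st : List String × String × Int) _ =>
        let line := st.2.1 ++ PySem.Int.toStr st.2.2
        (st.1 ++ [line ++ "\n"], line, st.2.2 + 1)) (acc, lineFrom 66 k, 66 + k)).1)
      = outAux l.length k (String.join acc) := by
  induction l with
  | nil => intro acc k; simp [outAux]
  | cons a l ih =>
      intro acc k
      simp only [List.foldl_cons, List.length_cons]
      have hline : lineFrom 66 k ++ PySem.Int.toStr (66 + (k : Int)) = lineFrom 66 (k + 1) :=
        (lineFrom_snoc k 66).symm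
      have hx : (66 : Int) + k + 1 = 66 + ((k + 1 : Nat) : Int) := by push_cast; ring
      show String.join ((l.foldl _ (acc ++ [(lineFrom 66 k ++ PySem.Int.toStr (66 + (k:Int))) ++ "\n"],
        lineFrom 66 k ++ PySem.Int.toStr (66 + (k:Int)), 66 + (k:Int) + 1)).1) = _
      rw [hline, hx, ih]
      rw [join_append, ← String.append_assoc]
      rfl

-- ===== VERDICT (by name: the statement is the Claim_ definition above) =====
theorem printalpha_spec : Claim_equal_printalpha := by
  intro n _
  unfold Spec_printalpha printalpha printalpha_alt
  by_cases hn : n ≤ 0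
  · rw [PySem.List.pyRange_one_eq_nil (by omega)]
    simp [String.join]
  · have hn2 : 0 < n := lt_of_not_ge hn
    have hsplit : n + 1 = 1 + (n.toNat : Int) := by omega
    rw [hsplit, outerA n.toNat 1 "" le_rfl]
    have e : (([], "", 66) : List String × String × Int) = ([], lineFrom 66 (0 : Nat), 66 + ((0 : Nat) : Int)) := by
      simp [lineFrom]
    rw [e, passB, PySem.List.length_pyRange_one]
    have h1 : ((1 : Int) - 1).toNat = 0 := rfl
    have h2 : (1 + (n.toNat : Int) - 1).toNat = n.toNat := by omega
    rw [h1, h2]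
    rfl
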